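-- pv_equiv track=rewrite | github.com/jeff10080/ensae-prog24 | swap_puzzle/grid.py | move_seq
-- ===== SOURCE A (Python) =====
-- def move_seq(i1, i2, j1, j2):
--     swap_h, swap_v = [], []
--
--     if j2 - j1 > 0:
--         swap_h.extend(((i1, y), (i1, y + 1)) for y in range(j1, j2))
--
--     if j2 - j1 < 0:
--         swap_h.extend(((i1, y), (i1, y - 1)) for y in range(j1, j2, -1))
--
--     if i2 - i1 > 0:
--         swap_v.extend(((x, j2), (x + 1, j2)) for x in range(i1, i2))
--
--     if i2 - i1 < 0:
--         swap_v.extend(((x, j2), (x - 1, j2)) for x in range(i1, i2, -1))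
--
--     swap_seq = swap_h + swap_v
--     return swap_seq
-- ===== SOURCE B (Python) =====
-- def move_seq(i1, i2, j1, j2):
--     step_j = 1 if j2 >= j1 else -1
--     step_i = 1 if i2 >= i1 else -1
--
--     def cells():
--         for j in range(j1, j2, step_j):
--             yield (i1, j)
--         for i in range(i1, i2, step_i):
--             yield (i, j2)
--         yield (i2, j2)
--
--     it = cells()
--     prev = next(it)
--     out = []
--     for cur in it:
--         out.append((prev, cur))
--         prev = cur
--     return out
-- ===== Notes on version B (the rewrite author's own statement) =====
-- stated objective: alternative
-- what changed: B generates the single path of visited cells (horizontal leg, vertical leg, corner) and emits swaps by pairing each cell with the previous one in one pass, instead of A's four sign-guarded branches building the two swap lists directly.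
import Mathlib
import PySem

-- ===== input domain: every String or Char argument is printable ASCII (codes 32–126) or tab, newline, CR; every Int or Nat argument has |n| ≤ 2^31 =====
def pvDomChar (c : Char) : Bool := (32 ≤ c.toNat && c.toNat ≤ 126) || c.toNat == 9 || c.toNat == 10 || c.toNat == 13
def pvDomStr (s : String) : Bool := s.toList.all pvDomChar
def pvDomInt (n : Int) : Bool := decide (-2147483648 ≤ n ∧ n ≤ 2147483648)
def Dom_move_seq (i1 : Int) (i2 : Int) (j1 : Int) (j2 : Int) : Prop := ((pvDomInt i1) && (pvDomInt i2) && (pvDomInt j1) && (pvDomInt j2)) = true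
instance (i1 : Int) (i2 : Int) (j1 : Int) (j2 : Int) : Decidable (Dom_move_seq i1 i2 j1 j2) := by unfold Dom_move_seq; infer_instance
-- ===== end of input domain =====

-- B builds the single path of visited cells and pairs consecutive cells, instead of A's
-- four sign-guarded branches; objective: alternative decomposition, same cost.

-- ===== PORT A =====
def move_seq (i1 : Int) (i2 : Int) (j1 : Int) (j2 : Int) : List ((Int × Int) × (Int × Int)) :=
  let swap_h : List ((Int × Int) × (Int × Int)) := []
  let swap_v : List ((Int × Int) × (Int × Int)) := []
  let swap_h := if j2 - j1 > 0 then
      swap_h ++ (PySem.List.pyRange j1 j2 1).map (fun y => ((i1, y), (i1, y + 1))) else swap_h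
  let swap_h := if j2 - j1 < 0 then
      swap_h ++ (PySem.List.pyRange j1 j2 (-1)).map (fun y => ((i1, y), (i1, y - 1))) else swap_h
  let swap_v := if i2 - i1 > 0 then
      swap_v ++ (PySem.List.pyRange i1 i2 1).map (fun x => ((x, j2), (x + 1, j2))) else swap_v
  let swap_v := if i2 - i1 < 0 then
      swap_v ++ (PySem.List.pyRange i1 i2 (-1)).map (fun x => ((x, j2), (x - 1, j2))) else swap_v
  let swap_seq := swap_h ++ swap_v
  swap_seq

-- ===== PORT B =====
-- the 'for cur in it' loop of B, carrying prev and the accumulated pairs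
def pairLoop {α : Type} (prev : α) (l : List α) : List (α × α) :=
  match l with
  | [] => []
  | c :: t => (prev, c) :: pairLoop c t

-- prev = next(it) then the pairing loop; next(it) on an empty cells never happens
-- in B, since cells always ends with the corner (the [] branch is unreachable)
def firstPair (cells : List (Int × Int)) : List ((Int × Int) × (Int × Int)) :=
  match cells with
  | [] => []
  | p :: rest => pairLoop p rest

def move_seq_alt (i1 : Int) (i2 : Int) (j1 : Int) (j2 : Int) : List ((Int × Int) × (Int × Int)) :=
  let step_j : Int := if j2 ≥ j1 then 1 else -1
  let step_i : Int := if i2 ≥ i1 then 1 else -1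
  -- cells(): horizontal leg, vertical leg, final corner, in order
  let cells := ((PySem.List.pyRange j1 j2 step_j).map (fun j => (i1, j))
      ++ (PySem.List.pyRange i1 i2 step_i).map (fun i => (i, j2)))
      ++ [(i2, j2)]
  firstPair cells

-- ===== PRECONDITION & SPEC =====
def Spec_move_seq (i1 : Int) (i2 : Int) (j1 : Int) (j2 : Int) (out : List ((Int × Int) × (Int × Int))) : Prop := out = move_seq_alt i1 i2 j1 j2
instance (i1 : Int) (i2 : Int) (j1 : Int) (j2 : Int) (out : List ((Int × Int) × (Int × Int))) : Decidable (Spec_move_seq i1 i2 j1 j2 out) := by unfold Spec_move_seq; infer_instance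

-- ===== CLAIM (what is proved, stated in full; the proofs are below) =====
def Claim_equal_move_seq : Prop := ∀ (i1 : Int) (i2 : Int) (j1 : Int) (j2 : Int), Dom_move_seq i1 i2 j1 j2 → Spec_move_seq i1 i2 j1 j2 (move_seq i1 i2 j1 j2)

-- ===== LEMMAS AND PROOFS =====

-- zip of a list with its own tail ("consecutive pairs")
def zipTail {α : Type} (l : List α) : List (α × α) := l.zip (l.drop 1)

theorem zipTail_cons_of_head {α : Type} (x u : α) (t : List α) (h : t.head? = some u) :
    zipTail (x :: t) = (x, u) :: zipTail t := by
  cases t with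
  | nil => simp at h
  | cons a t' => simp only [List.head?_cons, Option.some.injEq] at h; subst h; rfl

theorem zipTail_map_range {α : Type} (n : Nat) (g : Nat → α) (rest : List α)
    (h : rest.head? = some (g n)) :
    zipTail ((List.range n).map g ++ rest)
      = (List.range n).map (fun k => (g k, g (k + 1))) ++ zipTail rest := by
  induction n generalizing g with
  | zero => simp
  | succ n ih =>
    rw [List.range_succ_eq_map]
    simp only [List.map_cons, List.map_map, List.cons_append]
    have hhead : (((List.range n).map (g ∘ Nat.succ) ++ rest)).head? = some (g 1) := by
      cases n with
      | zero => simpa using h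
      | succ m =>
        rw [List.range_succ_eq_map]
        simp [Function.comp]
    rw [zipTail_cons_of_head _ _ _ hhead, ih (g ∘ Nat.succ) (by simpa using h)]
    simp [Function.comp]

theorem pairLoop_eq_zipTail {α : Type} (p : α) (l : List α) :
    pairLoop p l = zipTail (p :: l) := by
  induction l generalizing p with
  | nil => rfl
  | cons c t ih => rw [pairLoop, zipTail_cons_of_head p c (c :: t) rfl, ih]

-- move_seq_alt is zipTail of the path
theorem firstPair_eq_zipTail (cells : List (Int × Int)) (hc : cells ≠ []) :
    firstPair cells = zipTail cells := by
  cases cells with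
  | nil => exact absurd rfl hc
  | cons p rest => exact pairLoop_eq_zipTail p rest

theorem alt_eq_zipTail (i1 i2 j1 j2 : Int) :
    move_seq_alt i1 i2 j1 j2 =
      zipTail (((PySem.List.pyRange j1 j2 (if j2 ≥ j1 then 1 else -1)).map (fun j => (i1, j))
        ++ (PySem.List.pyRange i1 i2 (if i2 ≥ i1 then 1 else -1)).map (fun i => (i, j2)))
        ++ [((i2 : Int), (j2 : Int))]) := by
  unfold move_seq_alt
  exact firstPair_eq_zipTail _ (by simp)

-- head of the (vertical leg ++ corner) is always (i1, j2)
theorem head_vert_asc (i1 i2 j2 : Int) (hi : i1 ≤ i2) :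
    (((List.range (i2 - i1).toNat).map (fun (k : Nat) => ((i1 + (k : Int), j2) : Int × Int))
        ++ [((i2 : Int), (j2 : Int))])).head? = some ((i1 : Int), (j2 : Int)) := by
  cases hm : (i2 - i1).toNat with
  | zero => simp; omega
  | succ m => rw [List.range_succ_eq_map]; simp

theorem head_vert_desc (i1 i2 j2 : Int) (hi : i2 ≤ i1) :
    (((List.range (i1 - i2).toNat).map (fun (k : Nat) => ((i1 - (k : Int), j2) : Int × Int))
        ++ [((i2 : Int), (j2 : Int))])).head? = some ((i1 : Int), (j2 : Int)) := by
  cases hm : (i1 - i2).toNat with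
  | zero => simp; omega
  | succ m => rw [List.range_succ_eq_map]; simp

-- A's guarded extend of an ascending leg, under a ≤ b, is just the mapped range
theorem if_leg_asc {α : Type} (a b : Int) (hab : a ≤ b) (f : Int → α) :
    (if b - a > 0 then ([] : List α) ++ (PySem.List.pyRange a b 1).map f else [])
      = (PySem.List.pyRange a b 1).map f := by
  split_ifs with h
  · simp
  · rw [PySem.List.pyRange_one_eq_nil (by omega)]; simp

theorem if_leg_desc {α : Type} (a b : Int) (hab : b ≤ a) (f : Int → α) :
    (if b - a < 0 then ([] : List α) ++ (PySem.List.pyRange a b (-1)).map f else [])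
      = (PySem.List.pyRange a b (-1)).map f := by
  split_ifs with h
  · simp
  · rw [PySem.List.pyRange_neg_one_eq_nil (by omega)]; simp

-- ===== VERDICT (by name: the statement is the Claim_ definition above) =====
theorem move_seq_spec : Claim_equal_move_seq := by
  intro i1 i2 j1 j2 _
  unfold Spec_move_seq
  rw [alt_eq_zipTail, List.append_assoc]
  by_cases hj : j1 ≤ j2 <;> by_cases hi : i1 ≤ i2
  -- ascending columns / ascending rows
  · rw [if_pos (show j2 ≥ j1 by omega), if_pos (show i2 ≥ i1 by omega),
        PySem.List.pyRange_one, PySem.List.pyRange_one, List.map_map, List.map_map]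
    simp only [Function.comp_def]
    rw [zipTail_map_range ((j2 - j1).toNat) (fun k => ((i1, j1 + (k : Int)) : Int × Int)) _
          (by rw [head_vert_asc i1 i2 j2 hi]; simp; omega),
        zipTail_map_range ((i2 - i1).toNat) (fun k => ((i1 + (k : Int), j2) : Int × Int)) _
          (by simp; omega)]
    simp only [zipTail, List.drop_succ_cons, List.drop_nil, List.zip_nil_right, List.append_nil]
    simp only [move_seq]
    rw [if_neg (show ¬(j2 - j1 < 0) by omega), if_neg (show ¬(i2 - i1 < 0) by omega),
        if_leg_asc j1 j2 hj, if_leg_asc i1 i2 hi,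
        PySem.List.pyRange_one, PySem.List.pyRange_one, List.map_map, List.map_map]
    simp only [Function.comp_def]
    apply congrArg₂ <;> (apply List.map_congr_left; intro k _; push_cast; ring_nf)
  -- ascending columns / descending rows
  · rw [if_pos (show j2 ≥ j1 by omega), if_neg (show ¬(i2 ≥ i1) by omega),
        PySem.List.pyRange_one, PySem.List.pyRange_neg_one, List.map_map, List.map_map]
    simp only [Function.comp_def]
    rw [zipTail_map_range ((j2 - j1).toNat) (fun k => ((i1, j1 + (k : Int)) : Int × Int)) _
          (by rw [head_vert_desc i1 i2 j2 (by omega)]; simp; omega),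
        zipTail_map_range ((i1 - i2).toNat) (fun k => ((i1 - (k : Int), j2) : Int × Int)) _
          (by simp; omega)]
    simp only [zipTail, List.drop_succ_cons, List.drop_nil, List.zip_nil_right, List.append_nil]
    simp only [move_seq]
    rw [if_neg (show ¬(j2 - j1 < 0) by omega), if_neg (show ¬(i2 - i1 > 0) by omega),
        if_leg_asc j1 j2 hj, if_leg_desc i1 i2 (by omega),
        PySem.List.pyRange_one, PySem.List.pyRange_neg_one, List.map_map, List.map_map]
    simp only [Function.comp_def]
    apply congrArg₂ <;> (apply List.map_congr_left; intro k _; push_cast; ring_nf)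
  -- descending columns / ascending rows
  · rw [if_neg (show ¬(j2 ≥ j1) by omega), if_pos (show i2 ≥ i1 by omega),
        PySem.List.pyRange_neg_one, PySem.List.pyRange_one, List.map_map, List.map_map]
    simp only [Function.comp_def]
    rw [zipTail_map_range ((j1 - j2).toNat) (fun k => ((i1, j1 - (k : Int)) : Int × Int)) _
          (by rw [head_vert_asc i1 i2 j2 hi]; simp; omega),
        zipTail_map_range ((i2 - i1).toNat) (fun k => ((i1 + (k : Int), j2) : Int × Int)) _
          (by simp; omega)]
    simp only [zipTail, List.drop_succ_cons, List.drop_nil, List.zip_nil_right, List.append_nil]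
    simp only [move_seq]
    rw [if_neg (show ¬(j2 - j1 > 0) by omega), if_neg (show ¬(i2 - i1 < 0) by omega),
        if_leg_desc j1 j2 (by omega), if_leg_asc i1 i2 hi,
        PySem.List.pyRange_neg_one, PySem.List.pyRange_one, List.map_map, List.map_map]
    simp only [Function.comp_def]
    apply congrArg₂ <;> (apply List.map_congr_left; intro k _; push_cast; ring_nf)
  -- descending columns / descending rows
  · rw [if_neg (show ¬(j2 ≥ j1) by omega), if_neg (show ¬(i2 ≥ i1) by omega),
        PySem.List.pyRange_neg_one, PySem.List.pyRange_neg_one, List.map_map, List.map_map]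
    simp only [Function.comp_def]
    rw [zipTail_map_range ((j1 - j2).toNat) (fun k => ((i1, j1 - (k : Int)) : Int × Int)) _
          (by rw [head_vert_desc i1 i2 j2 (by omega)]; simp; omega),
        zipTail_map_range ((i1 - i2).toNat) (fun k => ((i1 - (k : Int), j2) : Int × Int)) _
          (by simp; omega)]
    simp only [zipTail, List.drop_succ_cons, List.drop_nil, List.zip_nil_right, List.append_nil]
    simp only [move_seq]
    rw [if_neg (show ¬(j2 - j1 > 0) by omega), if_neg (show ¬(i2 - i1 > 0) by omega),
        if_leg_desc j1 j2 (by omega), if_leg_desc i1 i2 (by omega),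
        PySem.List.pyRange_neg_one, PySem.List.pyRange_neg_one, List.map_map, List.map_map]
    simp only [Function.comp_def]
    apply congrArg₂ <;> (apply List.map_congr_left; intro k _; push_cast; ring_nf)
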